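-- pv_equiv track=rewrite | github.com/franciscodantas/Minitestes-UFCG | 08/aparta/aparta.py | aparta
-- ===== SOURCE A (Python) =====
-- def aparta(lista, k):
--     apartado = 0
--     for x in range(len(lista)):
--         for i in range(len(lista) - 1, 0, -1):
--             if not lista[i] % k == 0 and lista[i - 1] % k == 0:
--                 trocado = lista[i]
--                 lista[i] = lista[i - 1]
--                 lista[i - 1] = trocado
--         if lista[x] % k == 0:
--             apartado += 1
--
--     return apartado
-- ===== SOURCE B (Python) =====
-- def aparta(lista, k):
--     # Single pass: stable partition (non-divisible first, divisible last),
--     # written back into lista like A's bubble passes; return count of divisibles.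
--     divis = [v for v in lista if v % k == 0]
--     lista[:] = [v for v in lista if v % k != 0] + divis
--     return len(divis)
-- ===== Notes on version B (the rewrite author's own statement) =====
-- stated objective: faster
-- what changed: Replaces A's n repeated right-to-left bubble passes (each a full scan with adjacent swaps) by a single-pass stable partition via two filters; the returned count is just the number of divisible elements.
import Mathlib
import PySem

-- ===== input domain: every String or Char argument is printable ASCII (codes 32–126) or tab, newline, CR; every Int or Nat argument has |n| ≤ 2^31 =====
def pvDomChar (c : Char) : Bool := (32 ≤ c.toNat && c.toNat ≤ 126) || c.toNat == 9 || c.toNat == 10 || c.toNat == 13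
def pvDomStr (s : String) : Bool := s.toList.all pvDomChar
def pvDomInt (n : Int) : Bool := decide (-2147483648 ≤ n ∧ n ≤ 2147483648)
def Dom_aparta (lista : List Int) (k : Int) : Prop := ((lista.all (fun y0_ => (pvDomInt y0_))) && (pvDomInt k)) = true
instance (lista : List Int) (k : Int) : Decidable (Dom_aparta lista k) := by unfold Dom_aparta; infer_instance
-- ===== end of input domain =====

-- B replaces A's n right-to-left bubble passes by a single stable partition (two filters) and
-- returns the count of divisibles. A mutates `lista` in place; B performs the same final
-- mutation (stable partition) in Python; the Lean equivalence is about the RETURN value.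


-- ===== PORT A =====
-- inner loop 'for i in range(len(lista) - 1, 0, -1)': structural recursion on the counter,
-- `i+1` is the Python loop variable (it runs len-1, …, 1); indices are always in range,
-- so pyGetD/pySetD are exact here.
def apartaInner (k : Int) : List Int → Nat → List Int
  | l, 0 => l
  | l, (i+1) =>
      let li := PySem.List.pyGetD l ((i : Int) + 1) 0          -- lista[i]
      let lim1 := PySem.List.pyGetD l (i : Int) 0              -- lista[i-1]
      let l' := if ¬ PySem.Int.mod li k = 0 ∧ PySem.Int.mod lim1 k = 0 then
          -- trocado = lista[i]; lista[i] = lista[i-1]; lista[i-1] = trocado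
          PySem.List.pySetD (PySem.List.pySetD l ((i : Int) + 1) lim1) (i : Int) li
        else l
      apartaInner k l' i

def aparta (lista : List Int) (k : Int) : Int :=
  ((List.range lista.length).foldl (fun (st : List Int × Int) (x : Nat) =>
      let l := apartaInner k st.1 (st.1.length - 1)
      (l, st.2 + if PySem.Int.mod (PySem.List.pyGetD l (x : Int) 0) k = 0 then 1 else 0))
    (lista, 0)).2

-- ===== PORT B =====
def aparta_alt (lista : List Int) (k : Int) : Int :=
  let divis := lista.filter (fun v => decide (PySem.Int.mod v k = 0))
  -- lista[:] = [v for v in lista if v % k != 0] + divis  (in-place mutation: no effect on the return value)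
  PySem.List.len divis

-- ===== PRECONDITION & SPEC =====
-- Pre_ excludes exactly the ZeroDivisionError inputs: k = 0 with a nonempty list (both Pythons raise there).
def Pre_aparta (lista : List Int) (k : Int) : Prop := k ≠ 0 ∨ lista = []
instance (lista : List Int) (k : Int) : Decidable (Pre_aparta lista k) := by unfold Pre_aparta; infer_instance
def pvWitness_aparta : List Int × Int := ([6, 1, 4, 3, 0, -2], 2)

def Spec_aparta (lista : List Int) (k : Int) (out : Int) : Prop := out = aparta_alt lista k
instance (lista : List Int) (k : Int) (out : Int) : Decidable (Spec_aparta lista k out) := by unfold Spec_aparta; infer_instance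

-- ===== CLAIM (what is proved, stated in full; the proofs are below) =====
def Claim_equal_aparta : Prop := ∀ (lista : List Int) (k : Int), Dom_aparta lista k → Pre_aparta lista k → Spec_aparta lista k (aparta lista k)

-- ===== LEMMAS AND PROOFS =====

-- one bubble pass (indices len-1 … 1), written as the structural recursion from the left:
-- the suffix pairs are processed before the pair at the head.
def passS (k : Int) : List Int → List Int
  | [] => []
  | x :: rest =>
      match passS k rest with
      | [] => [x]
      | y :: t => if ¬ PySem.Int.mod y k = 0 ∧ PySem.Int.mod x k = 0 then y :: x :: t else x :: y :: t

theorem length_passS (k : Int) (l : List Int) : (passS k l).length = l.length := by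
  induction l with
  | nil => rfl
  | cons x rest ih =>
      cases h : passS k rest with
      | nil => simp_all [passS]
      | cons y t => rw [h] at ih; simp only [passS, h]; split <;> simp_all

theorem perm_passS (k : Int) (l : List Int) : (passS k l).Perm l := by
  induction l with
  | nil => rfl
  | cons x rest ih =>
      cases h : passS k rest with
      | nil => rw [h] at ih; simp only [passS, h]; simpa using (List.Perm.cons x ih)
      | cons y t =>
        rw [h] at ih
        simp only [passS, h]
        split
        · exact (List.Perm.swap x y t).trans (List.Perm.cons x ih)
        · exact List.Perm.cons x ih

theorem passS_cons_not (k x : Int) (rest : List Int) (hx : ¬ PySem.Int.mod x k = 0) :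
    passS k (x :: rest) = x :: passS k rest := by
  cases h : passS k rest with
  | nil => simp [passS, h]
  | cons y t => simp [passS, h, hx]

theorem passS_all (k : Int) (l : List Int) (h : ∀ v ∈ l, PySem.Int.mod v k = 0) :
    passS k l = l := by
  induction l with
  | nil => rfl
  | cons x rest ih =>
      have hr := ih (fun v hv => h v (List.mem_cons_of_mem _ hv))
      cases hrest : passS k rest with
      | nil =>
          have h0 : rest = [] := by
            have := length_passS k rest; rw [hrest] at this; exact List.length_eq_zero_iff.mp this.symm
          simp [passS, h0]
      | cons y t =>
          have he : rest = y :: t := by rw [← hr, hrest]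
          have hy : PySem.Int.mod y k = 0 := h y (by simp [he])
          simp only [passS, hrest]
          simp [hy, he]

theorem passS_head_not (k : Int) (l : List Int) (h : ∃ v ∈ l, ¬ PySem.Int.mod v k = 0) :
    ∃ y t, passS k l = y :: t ∧ ¬ PySem.Int.mod y k = 0 := by
  induction l with
  | nil => simp at h
  | cons x rest ih =>
      by_cases hx : PySem.Int.mod x k = 0
      · have hr : ∃ v ∈ rest, ¬ PySem.Int.mod v k = 0 := by
          rcases h with ⟨v, hv, hnv⟩
          rcases List.mem_cons.mp hv with rfl | hv'
          · exact absurd hx hnv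
          · exact ⟨v, hv', hnv⟩
        rcases ih hr with ⟨y, t, hyt, hy⟩
        exact ⟨y, x :: t, by simp [passS, hyt, hy, hx], hy⟩
      · cases hrest : passS k rest with
        | nil => exact ⟨x, [], by simp [passS, hrest], hx⟩
        | cons y t => exact ⟨x, y :: t, by simp [passS, hrest, hx], hx⟩

theorem passS_append_not (k : Int) (w c : List Int) (hw : ∀ v ∈ w, ¬ PySem.Int.mod v k = 0) :
    passS k (w ++ c) = w ++ passS k c := by
  induction w with
  | nil => rfl
  | cons x w' ih =>
      have := ih (fun v hv => hw v (List.mem_cons_of_mem _ hv))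
      rw [List.cons_append, passS_cons_not k x (w' ++ c) (hw x (by simp)), this, List.cons_append]

-- peeling the LAST pair: the inner loop's step at the rightmost pair, seen through passS
theorem passS_append_pair (k : Int) (m : List Int) (a b : Int) :
    passS k (m ++ [a, b]) =
      if ¬ PySem.Int.mod b k = 0 ∧ PySem.Int.mod a k = 0
      then passS k (m ++ [b]) ++ [a] else passS k (m ++ [a]) ++ [b] := by
  induction m with
  | nil => by_cases h1 : PySem.Int.mod b k = 0 <;> by_cases h2 : PySem.Int.mod a k = 0 <;>
      simp [passS, h1, h2]
  | cons c m' ih =>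
      by_cases hc : ¬ PySem.Int.mod b k = 0 ∧ PySem.Int.mod a k = 0
      · rw [if_pos hc] at ih ⊢
        cases hp : passS k (m' ++ [b]) with
        | nil =>
            have := length_passS k (m' ++ [b]); rw [hp] at this; simp at this
        | cons y t =>
            rw [List.cons_append, List.cons_append]
            simp only [passS, ih, hp, List.cons_append]
            split <;> simp
      · rw [if_neg hc] at ih ⊢
        cases hp : passS k (m' ++ [a]) with
        | nil =>
            have := length_passS k (m' ++ [a]); rw [hp] at this; simp at this
        | cons y t =>
            rw [List.cons_append, List.cons_append]
            simp only [passS, ih, hp, List.cons_append]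
            split <;> simp

theorem set_append_mid (t0 r : List Int) (x v : Int) :
    (t0 ++ x :: r).set t0.length v = t0 ++ v :: r := by simp

theorem set_append_mid1 (t0 r : List Int) (x y v : Int) :
    (t0 ++ x :: y :: r).set (t0.length + 1) v = t0 ++ x :: v :: r := by
  simp

-- the inner downward loop from index i, seen as one structural bubble pass on the prefix 0..i
theorem apartaInner_eq (k : Int) : ∀ (i : Nat) (l : List Int), i < l.length →
    apartaInner k l i = passS k (l.take (i+1)) ++ l.drop (i+1) := by
  intro i
  induction i with
  | zero =>
      intro l h
      cases l with
      | nil => simp at h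
      | cons x xs => simp [apartaInner, passS]
  | succ i ih =>
      intro l h
      obtain ⟨t0, rest, hl, ht0⟩ : ∃ t0 rest, l = t0 ++ rest ∧ t0.length = i :=
        ⟨l.take i, l.drop i, (List.take_append_drop i l).symm, by simp; omega⟩
      rcases rest with _ | ⟨a, rest'⟩
      · exfalso; subst hl; simp at h; omega
      rcases rest' with _ | ⟨b, r⟩
      · exfalso; subst hl; simp at h ht0; omega
      subst hl
      subst ht0
      have hga : PySem.List.pyGetD (t0 ++ a :: b :: r) ((t0.length : Nat) : Int) 0 = a := by
        rw [PySem.List.pyGetD_natCast]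
        simp
      have hgb : PySem.List.pyGetD (t0 ++ a :: b :: r) (((t0.length : Nat) : Int) + 1) 0 = b := by
        rw [show ((t0.length : Nat) : Int) + 1 = (((t0.length + 1 : Nat)) : Int) by push_cast; ring,
            PySem.List.pyGetD_natCast]
        simp
      simp only [apartaInner, hga, hgb]
      by_cases hc : ¬ PySem.Int.mod b k = 0 ∧ PySem.Int.mod a k = 0
      · rw [if_pos hc]
        have hset : PySem.List.pySetD
            (PySem.List.pySetD (t0 ++ a :: b :: r) (((t0.length : Nat) : Int) + 1) a)
            ((t0.length : Nat) : Int) b = t0 ++ b :: a :: r := by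
          rw [show ((t0.length : Nat) : Int) + 1 = (((t0.length + 1 : Nat)) : Int) by push_cast; ring]
          rw [PySem.List.pySetD_natCast, PySem.List.pySetD_natCast]
          rw [set_append_mid1]
          exact set_append_mid t0 (a :: r) a b
        rw [hset, ih (t0 ++ b :: a :: r) (by simp)]
        have h1 : (t0 ++ b :: a :: r).take (t0.length + 1) = t0 ++ [b] := by
          simp [List.take_append]
        have h2 : (t0 ++ b :: a :: r).drop (t0.length + 1) = a :: r := by
          simp [List.drop_append]
        have h3 : (t0 ++ a :: b :: r).take (t0.length + 1 + 1) = t0 ++ [a, b] := by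
          rw [show t0.length + 1 + 1 = t0.length + 2 from rfl]
          simp [List.take_append]
        have h4 : (t0 ++ a :: b :: r).drop (t0.length + 1 + 1) = r := by
          rw [show t0.length + 1 + 1 = t0.length + 2 from rfl]
          simp [List.drop_append]
        rw [h1, h2, h3, h4, passS_append_pair, if_pos hc]
        simp
      · rw [if_neg hc]
        rw [ih (t0 ++ a :: b :: r) (by simp)]
        have h1 : (t0 ++ a :: b :: r).take (t0.length + 1) = t0 ++ [a] := by
          simp [List.take_append]
        have h2 : (t0 ++ a :: b :: r).drop (t0.length + 1) = b :: r := by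
          simp [List.drop_append]
        have h3 : (t0 ++ a :: b :: r).take (t0.length + 1 + 1) = t0 ++ [a, b] := by
          rw [show t0.length + 1 + 1 = t0.length + 2 from rfl]
          simp [List.take_append]
        have h4 : (t0 ++ a :: b :: r).drop (t0.length + 1 + 1) = r := by
          rw [show t0.length + 1 + 1 = t0.length + 2 from rfl]
          simp [List.drop_append]
        rw [h1, h2, h3, h4, passS_append_pair, if_neg hc]
        simp

theorem apartaInner_full (k : Int) (l : List Int) :
    apartaInner k l (l.length - 1) = passS k l := by
  cases l with
  | nil => rfl
  | cons x xs =>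
      have h := apartaInner_eq k xs.length (x :: xs) (by simp)
      simpa using h

-- number of non-divisible elements / length of the leading non-divisible prefix
def mNon (k : Int) (l : List Int) : Nat := l.countP (fun v => decide (¬ PySem.Int.mod v k = 0))
def leadNon (k : Int) (l : List Int) : Nat :=
  (l.takeWhile (fun v => decide (¬ PySem.Int.mod v k = 0))).length

theorem mNon_passS (k : Int) (l : List Int) : mNon k (passS k l) = mNon k l :=
  (perm_passS k l).countP_eq _

theorem mem_takeWhile_not (k : Int) (l : List Int) (a : Int)
    (ha : a ∈ l.takeWhile (fun v => decide (¬ PySem.Int.mod v k = 0))) :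
    ¬ PySem.Int.mod a k = 0 := by
  simpa using List.mem_takeWhile_imp (p := fun v => decide (¬ PySem.Int.mod v k = 0)) ha

-- the leading non-divisible prefix: decomposition used by the invariant proofs
theorem leadNon_split (k : Int) (l : List Int) :
    ∃ w c, l = w ++ c ∧ (∀ v ∈ w, ¬ PySem.Int.mod v k = 0) ∧ leadNon k l = w.length ∧
      mNon k l = w.length + mNon k c := by
  refine ⟨l.takeWhile (fun v => decide (¬ PySem.Int.mod v k = 0)),
          l.dropWhile (fun v => decide (¬ PySem.Int.mod v k = 0)),
          (List.takeWhile_append_dropWhile).symm, fun v hv => mem_takeWhile_not k l v hv, rfl, ?_⟩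
  unfold mNon
  conv_lhs => rw [← List.takeWhile_append_dropWhile
    (p := fun v => decide (¬ PySem.Int.mod v k = 0)) (l := l)]
  rw [List.countP_append]
  congr 1
  rw [List.countP_eq_length]
  intro a ha
  simpa using mem_takeWhile_not k l a ha

theorem mNon_zero_all (k : Int) (c : List Int) (h : mNon k c = 0) :
    ∀ v ∈ c, PySem.Int.mod v k = 0 := by
  intro v hv
  by_contra hnv
  have hpos : 0 < mNon k c :=
    List.countP_pos_iff.mpr ⟨v, hv, by simpa using hnv⟩
  omega

theorem leadNon_le_mNon (k : Int) (l : List Int) : leadNon k l ≤ mNon k l := by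
  obtain ⟨w, c, _, _, hlead, hcnt⟩ := leadNon_split k l
  omega

theorem passS_settled (k : Int) (l : List Int) (h : leadNon k l = mNon k l) :
    passS k l = l := by
  obtain ⟨w, c, hsplit, hwAll, hlead, hcnt⟩ := leadNon_split k l
  have hc0 : mNon k c = 0 := by omega
  calc passS k l = passS k (w ++ c) := by rw [← hsplit]
    _ = w ++ passS k c := passS_append_not k w c hwAll
    _ = w ++ c := by rw [passS_all k c (mNon_zero_all k c hc0)]
    _ = l := hsplit.symm

theorem leadNon_append_cons (k : Int) (w t : List Int) (y : Int)
    (hw : ∀ v ∈ w, ¬ PySem.Int.mod v k = 0) (hy : ¬ PySem.Int.mod y k = 0) :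
    w.length + 1 ≤ leadNon k (w ++ y :: t) := by
  induction w with
  | nil => simp [leadNon, hy]
  | cons x w' ih =>
      have hx : ¬ PySem.Int.mod x k = 0 := hw x (by simp)
      have h' := ih (fun v hv => hw v (List.mem_cons_of_mem _ hv))
      simp only [leadNon, List.cons_append, List.takeWhile_cons, decide_eq_true_eq] at h' ⊢
      rw [if_pos hx]
      simp only [List.length_cons]
      omega

theorem passS_grow (k : Int) (l : List Int) (h : leadNon k l < mNon k l) :
    leadNon k l + 1 ≤ leadNon k (passS k l) := by
  obtain ⟨w, c, hsplit, hwAll, hlead, hcnt⟩ := leadNon_split k l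
  have hcpos : 0 < mNon k c := by omega
  have hex : ∃ v ∈ c, ¬ PySem.Int.mod v k = 0 := by
    rcases List.countP_pos_iff.mp hcpos with ⟨v, hv, hpv⟩
    exact ⟨v, hv, by simpa using hpv⟩
  rcases passS_head_not k c hex with ⟨y, t, hyt, hyp⟩
  have hps : passS k l = w ++ y :: t := by
    rw [hsplit, passS_append_not k w c hwAll, hyt]
  rw [hps, hlead]
  exact leadNon_append_cons k w t y hwAll hyp

theorem length_iter (k : Int) (p : Nat) (l : List Int) :
    ((passS k)^[p] l).length = l.length := by
  induction p with
  | zero => rfl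
  | succ p ih => rw [Function.iterate_succ_apply', length_passS, ih]

theorem mNon_iter (k : Int) (p : Nat) (l : List Int) :
    mNon k ((passS k)^[p] l) = mNon k l := by
  induction p with
  | zero => rfl
  | succ p ih => rw [Function.iterate_succ_apply', mNon_passS, ih]

theorem leadNon_iter (k : Int) (p : Nat) (l : List Int) :
    min p (mNon k l) ≤ leadNon k ((passS k)^[p] l) := by
  induction p with
  | zero => simp
  | succ p ih =>
      rw [Function.iterate_succ_apply']
      set L := (passS k)^[p] l with hL
      have hm : mNon k L = mNon k l := mNon_iter k p l
      have hle : leadNon k L ≤ mNon k L := leadNon_le_mNon k L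
      by_cases hs : leadNon k L = mNon k L
      · rw [passS_settled k L hs]
        omega
      · have := passS_grow k L (by omega)
        omega

theorem lead_get (k : Int) : ∀ (L : List Int) (j : Nat) (hj : j < L.length),
    j < leadNon k L → ¬ PySem.Int.mod L[j] k = 0 := by
  intro L
  induction L with
  | nil => intro j hj; simp at hj
  | cons x L' ih =>
      intro j hj hlt
      by_cases hx : PySem.Int.mod x k = 0
      · simp [leadNon, hx] at hlt
      · cases j with
        | zero => simpa using hx
        | succ j' =>
            simp only [leadNon, List.takeWhile_cons, decide_eq_true_eq, if_pos hx,
              List.length_cons] at hlt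
            exact ih j' (by simpa using Nat.lt_of_succ_lt_succ hj) (by unfold leadNon; omega)

theorem settled_get (k : Int) (L : List Int) (j : Nat) (hj : j < L.length)
    (hlead : leadNon k L = mNon k L) (hge : mNon k L ≤ j) :
    PySem.Int.mod L[j] k = 0 := by
  obtain ⟨w, c, hsplit, hwAll, hl, hcnt⟩ := leadNon_split k L
  have hc0 : mNon k c = 0 := by omega
  have hjw : w.length ≤ j := by omega
  have hmem : L[j] ∈ c := by
    have hj' : j < (w ++ c).length := by rw [← hsplit]; exact hj
    have hg : (w ++ c)[j] ∈ c := by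
      rw [List.getElem_append_right hjw]
      exact List.getElem_mem _
    have : L[j] = (w ++ c)[j]'hj' := by congr 1
    rw [this]; exact hg
  exact mNon_zero_all k c hc0 _ hmem

-- the outer loop: state after iterating = (p passes, running sum of the per-index checks)
theorem aparta_fold (k : Int) (l0 : List Int) (n : Nat) :
    (List.range n).foldl (fun (st : List Int × Int) (x : Nat) =>
      let l := apartaInner k st.1 (st.1.length - 1)
      (l, st.2 + if PySem.Int.mod (PySem.List.pyGetD l (x : Int) 0) k = 0 then 1 else 0)) (l0, 0)
    = ((passS k)^[n] l0,
       ((List.range n).map (fun j =>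
          if PySem.Int.mod (PySem.List.pyGetD ((passS k)^[j+1] l0) (j : Int) 0) k = 0
          then (1 : Int) else 0)).sum) := by
  induction n with
  | zero => simp
  | succ n ih =>
      rw [List.range_succ, List.foldl_append, ih, List.map_append, List.sum_append]
      simp only [List.foldl_cons, List.foldl_nil, List.map_cons, List.map_nil, List.sum_cons,
        List.sum_nil, apartaInner_full]
      rw [← Function.iterate_succ_apply' (passS k) n l0]
      simp [add_zero]

theorem sum_range_ge (m : Nat) : ∀ n : Nat,
    ((List.range n).map (fun j => if m ≤ j then (1 : Int) else 0)).sum = ((n - m : Nat) : Int) := by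
  intro n
  induction n with
  | zero => simp
  | succ n ih =>
      rw [List.range_succ, List.map_append, List.sum_append, ih]
      by_cases h : m ≤ n
      · simp only [List.map_cons, List.map_nil, List.sum_cons, List.sum_nil, if_pos h]
        omega
      · simp only [List.map_cons, List.map_nil, List.sum_cons, List.sum_nil, if_neg h]
        omega

-- ===== VERDICT (by name: the statement is the Claim_ definition above) =====
theorem aparta_spec : Claim_equal_aparta := by
  unfold Claim_equal_aparta
  intro lista k _ _
  unfold Spec_aparta aparta aparta_alt
  rw [aparta_fold k lista lista.length]
  set n := lista.length with hn
  set m := mNon k lista with hm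
  have hmn : m ≤ n := by
    have := List.countP_le_length
      (p := fun v => decide (¬ PySem.Int.mod v k = 0)) (l := lista)
    simpa [hm, mNon, hn] using this
  have hterm : ∀ j ∈ List.range n,
      (if PySem.Int.mod (PySem.List.pyGetD ((passS k)^[j+1] lista) (j : Int) 0) k = 0
       then (1 : Int) else 0)
      = (if m ≤ j then (1 : Int) else 0) := by
    intro j hj
    have hjn : j < n := List.mem_range.mp hj
    set L := (passS k)^[j+1] lista with hL
    have hlen : L.length = n := by rw [hL, length_iter]
    have hjL : j < L.length := by omega
    have hget : PySem.List.pyGetD L (j : Int) 0 = L[j] := by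
      rw [PySem.List.pyGetD_natCast]
      exact List.getD_eq_getElem L 0 hjL
    have hmL : mNon k L = m := by rw [hL, mNon_iter]
    have hlead : min (j+1) m ≤ leadNon k L := by
      have := leadNon_iter k (j+1) lista
      rwa [← hm] at this
    by_cases hc : m ≤ j
    · have hleadEq : leadNon k L = mNon k L := by
        have := leadNon_le_mNon k L
        omega
      have := settled_get k L j hjL hleadEq (by omega)
      rw [hget]
      simp [this, hc]
    · have hjlt : j < leadNon k L := by omega
      have := lead_get k L j hjL hjlt
      rw [hget]
      simp [this, hc]
  rw [List.map_congr_left hterm, sum_range_ge m n]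
  have hfl : (lista.filter (fun v => decide (PySem.Int.mod v k = 0))).length
      = lista.countP (fun v => decide (PySem.Int.mod v k = 0)) :=
    (List.countP_eq_length_filter (p := fun v => decide (PySem.Int.mod v k = 0)) (l := lista)).symm
  have hsplit2 : lista.countP (fun v => decide (PySem.Int.mod v k = 0)) + m = n := by
    rw [hm, hn]
    unfold mNon
    have := List.length_eq_countP_add_countP
      (p := fun v => decide (PySem.Int.mod v k = 0)) (l := lista)
    rw [this]
    congr 1
    apply List.countP_congr
    intro a _
    simp
  rw [PySem.List.len_eq, hfl]
  omega
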